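-- pv_equiv track=rewrite | github.com/SebastianJHM/dev | Python/Python 2.7 Scripts/picas_y_fijas.py | ContarPicas
-- ===== SOURCE A (Python) =====
-- def ContarPicas( N, G ):
--     p = 0
--     for i in range( len( N ) ):
--         found = False
--         j = 0
--         while ( j < len( G ) ) and ( not found ):
--             found = ( N[ i ] == G[ j ] ) and ( i != j )
--             j = j + 1
--         # elihw
--         if found:
--             p = p + 1
--         # fi
--     # rof
--     return p
-- ===== SOURCE B (Python) =====
-- def ContarPicas(N, G):
--     cnt = {}
--     for g in G:
--         cnt[g] = cnt.get(g, 0) + 1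
--     p = 0
--     for i, v in enumerate(N):
--         c = cnt.get(v, 0)
--         if c > 1 or (c == 1 and (i >= len(G) or G[i] != v)):
--             p += 1
--     return p
-- ===== Notes on version B (the rewrite author's own statement) =====
-- stated objective: faster
-- what changed: B builds a value->count dictionary over G once and decides each position i by the count plus a single direct check of G[i], replacing A's per-position linear rescan of G.
import Mathlib
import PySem

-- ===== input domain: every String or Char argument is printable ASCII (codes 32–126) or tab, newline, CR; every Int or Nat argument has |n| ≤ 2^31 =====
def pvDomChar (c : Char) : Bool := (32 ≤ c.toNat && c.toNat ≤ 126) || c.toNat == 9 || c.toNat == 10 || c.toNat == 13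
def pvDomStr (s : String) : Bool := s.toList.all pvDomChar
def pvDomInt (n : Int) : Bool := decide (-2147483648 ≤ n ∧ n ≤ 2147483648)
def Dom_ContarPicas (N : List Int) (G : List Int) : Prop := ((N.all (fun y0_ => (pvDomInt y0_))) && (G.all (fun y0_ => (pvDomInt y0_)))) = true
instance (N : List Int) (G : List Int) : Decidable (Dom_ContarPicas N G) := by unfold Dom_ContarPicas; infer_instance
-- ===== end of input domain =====

-- B replaces A's per-position linear scan of G by a value→count dictionary built once,
-- plus a single direct check of G[i]; objective: faster (O(n+m) instead of O(n·m)).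

-- ===== PORT A =====
-- the while-loop of A, fuel = enough iterations (G.length + 1 at the call site)
def pvLoopA (v : Int) (G : List Int) (i : Int) (j : Int) (found : Bool) : Nat → Bool
  | 0 => found
  | Nat.succ f =>
    if j < (G.length : Int) ∧ found = false then
      pvLoopA v G i (j + 1) (decide (v = PySem.List.pyGetD G j 0) && decide (i ≠ j)) f
    else found

def ContarPicas (N : List Int) (G : List Int) : Int :=
  (PySem.List.pyRange 0 (N.length : Int) 1).foldl
    (fun p i =>
      let found := pvLoopA (PySem.List.pyGetD N i 0) G i 0 false (G.length + 1)
      if found then p + 1 else p) 0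

-- ===== PORT B =====
def ContarPicas_alt (N : List Int) (G : List Int) : Int :=
  let cnt : PySem.Dict Int Int := G.foldl (fun d g => d.insert g (d.getD g 0 + 1)) PySem.Dict.empty
  (PySem.List.enumerate N 0).foldl
    (fun p iv =>
      let c := cnt.getD iv.2 0
      if 1 < c ∨ (c = 1 ∧ ((G.length : Int) ≤ iv.1 ∨ PySem.List.pyGetD G iv.1 0 ≠ iv.2)) then
        p + 1
      else p) 0

-- ===== PRECONDITION & SPEC =====
def Spec_ContarPicas (N : List Int) (G : List Int) (out : Int) : Prop := out = ContarPicas_alt N G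
instance (N : List Int) (G : List Int) (out : Int) : Decidable (Spec_ContarPicas N G out) := by unfold Spec_ContarPicas; infer_instance

-- ===== CLAIM (what is proved, stated in full; the proofs are below) =====
def Claim_equal_ContarPicas : Prop := ∀ (N : List Int) (G : List Int), Dom_ContarPicas N G → Spec_ContarPicas N G (ContarPicas N G)

-- ===== LEMMAS AND PROOFS =====

theorem pvLoopA_true (v : Int) (G : List Int) (i j : Int) (fuel : Nat) :
    pvLoopA v G i j true fuel = true := by
  cases fuel with
  | zero => rfl
  | succ f => simp [pvLoopA]

theorem pvLoopA_spec (v : Int) (G : List Int) (i : Int) :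
    ∀ (fuel : Nat) (jn : Nat), G.length ≤ jn + fuel →
      pvLoopA v G i (jn : Int) false fuel
        = decide (∃ m, ∃ _ : m < G.length, jn ≤ m ∧ G[m] = v ∧ i ≠ (m : Int)) := by
  intro fuel
  induction fuel with
  | zero =>
    intro jn h
    simp only [pvLoopA]
    symm
    simp only [decide_eq_false_iff_not]
    rintro ⟨m, hm, hjm, -⟩
    omega
  | succ f ih =>
    intro jn h
    by_cases hlt : jn < G.length
    · have hcast : ((jn : Int) < (G.length : Int)) := by exact_mod_cast hlt
      have hget : PySem.List.pyGetD G (jn : Int) 0 = G[jn] := by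
        rw [PySem.List.pyGetD_natCast]
        exact List.getD_eq_getElem _ _ hlt
      rw [pvLoopA, if_pos ⟨hcast, rfl⟩]
      by_cases hfound : v = G[jn] ∧ i ≠ (jn : Int)
      · have hb : (decide (v = PySem.List.pyGetD G (jn : Int) 0) && decide (i ≠ (jn : Int))) = true := by
          simp [hget, hfound.1, hfound.2]
        rw [hb, pvLoopA_true]
        symm
        simp only [decide_eq_true_iff]
        exact ⟨jn, hlt, le_refl _, hfound.1.symm, hfound.2⟩
      · have hb : (decide (v = PySem.List.pyGetD G (jn : Int) 0) && decide (i ≠ (jn : Int))) = false := by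
          rw [hget]
          by_cases h1 : v = G[jn] <;> by_cases h2 : i ≠ (jn : Int) <;> simp [h1, h2] <;> tauto
        rw [hb]
        have hc : ((jn : Int) + 1) = ((jn + 1 : Nat) : Int) := by push_cast; ring
        rw [hc, ih (jn + 1) (by omega)]
        rw [decide_eq_decide]
        constructor
        · rintro ⟨m, hm, hjm, hgv, hne⟩
          exact ⟨m, hm, by omega, hgv, hne⟩
        · rintro ⟨m, hm, hjm, hgv, hne⟩
          refine ⟨m, hm, ?_, hgv, hne⟩
          rcases Nat.lt_or_ge jn m with h' | h'
          · omega
          · exfalso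
            have hmj : m = jn := by omega
            subst hmj
            exact hfound ⟨hgv.symm, hne⟩
    · have hcast : ¬ ((jn : Int) < (G.length : Int)) := by exact_mod_cast hlt
      rw [pvLoopA, if_neg (fun hh => hcast hh.1)]
      symm
      simp only [decide_eq_false_iff_not]
      rintro ⟨m, hm, hjm, -⟩
      omega

-- existence of another index with value v  ↔  count/lookup formulation
theorem exists_other_index_iff (G : List Int) (v : Int) :
    ∀ (k : Nat),
      (∃ m, ∃ _ : m < G.length, G[m] = v ∧ (k : Int) ≠ (m : Int))
        ↔ (v ∈ G ∧ (1 < G.count v ∨ G[k]? ≠ some v)) := by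
  induction G with
  | nil => intro k; simp
  | cons a t ih =>
    intro k
    have hsplit : (∃ m, ∃ _ : m < (a :: t).length, (a :: t)[m] = v ∧ (k : Int) ≠ (m : Int))
        ↔ ((a = v ∧ (k : Int) ≠ 0) ∨ ∃ m, ∃ _ : m < t.length, t[m] = v ∧ (k : Int) ≠ ((m + 1 : Nat) : Int)) := by
      constructor
      · rintro ⟨m, hm, hgv, hne⟩
        cases m with
        | zero => left; exact ⟨hgv, by exact_mod_cast hne⟩
        | succ m' => right; exact ⟨m', by simpa using hm, hgv, hne⟩
      · rintro (⟨hgv, hne⟩ | ⟨m, hm, hgv, hne⟩)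
        · exact ⟨0, by simp, hgv, by exact_mod_cast hne⟩
        · exact ⟨m + 1, by simpa using hm, hgv, hne⟩
    rw [hsplit]
    cases k with
    | zero =>
      have h2 : (∃ m, ∃ _ : m < t.length, t[m] = v ∧ ((0 : Nat) : Int) ≠ ((m + 1 : Nat) : Int)) ↔ v ∈ t := by
        constructor
        · rintro ⟨m, hm, hgv, -⟩; exact hgv ▸ List.getElem_mem hm
        · intro hv
          obtain ⟨m, hm, hgv⟩ := List.mem_iff_getElem.mp hv
          exact ⟨m, hm, hgv, by push_cast; omega⟩
      rw [h2]
      by_cases hav : a = v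
      · subst hav
        simp only [Int.natCast_zero, ne_eq, not_true_eq_false, and_false, false_or,
          List.count_cons_self, List.getElem?_cons_zero, List.mem_cons, true_or, true_and]
        rw [← List.count_pos_iff]
        constructor
        · intro h; left; omega
        · rintro (h | h)
          · omega
          · exact h.elim
      · simp only [Int.natCast_zero, ne_eq, not_true_eq_false, and_false, false_or,
          List.getElem?_cons_zero, List.mem_cons]
        constructor
        · intro hv
          exact ⟨Or.inr hv, Or.inr (fun h => hav (Option.some_injective _ h))⟩
        · rintro ⟨hv | hv, -⟩
          · exact absurd hv.symm hav
          · exact hv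
    | succ n =>
      have h2 : (∃ m, ∃ _ : m < t.length, t[m] = v ∧ ((n + 1 : Nat) : Int) ≠ ((m + 1 : Nat) : Int))
          ↔ (∃ m, ∃ _ : m < t.length, t[m] = v ∧ (n : Int) ≠ (m : Int)) := by
        constructor <;> rintro ⟨m, hm, hgv, hne⟩ <;>
          exact ⟨m, hm, hgv, by intro hh; apply hne; push_cast at hh ⊢; omega⟩
      rw [h2, ih n]
      have hne0 : ((n + 1 : Nat) : Int) ≠ 0 := by push_cast; omega
      have hget : (a :: t)[n + 1]? = t[n]? := rfl
      rw [hget]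
      by_cases hav : a = v
      · subst hav
        simp only [List.count_cons_self, List.mem_cons, true_or, true_and]
        constructor
        · intro _
          by_cases hn : t[n]? = some a
          · left
            have hv : a ∈ t := List.mem_of_getElem? hn
            have := List.count_pos_iff.mpr hv
            omega
          · right; exact hn
        · intro _; exact Or.inl hne0
      · have hva : ¬ (v = a) := fun h => hav h.symm
        have hcnt : (a :: t).count v = t.count v := by simp [hav]
        rw [hcnt]
        simp only [List.mem_cons]
        constructor
        · rintro (⟨h, -⟩ | ⟨hv, hc⟩)
          · exact absurd h hav
          · exact ⟨Or.inr hv, hc⟩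
        · rintro ⟨hv | hv, hc⟩
          · exact absurd hv hva
          · exact Or.inr ⟨hv, hc⟩

-- per-index equivalence of the two conditions
theorem cond_equiv (G : List Int) (v : Int) (k : Nat) :
    (∃ m, ∃ _ : m < G.length, G[m] = v ∧ (k : Int) ≠ (m : Int))
      ↔ (1 < G.count v ∨ (G.count v = 1 ∧ ((G.length : Int) ≤ (k : Int) ∨ PySem.List.pyGetD G (k : Int) 0 ≠ v))) := by
  have hstep : ((G.length : Int) ≤ (k : Int) ∨ PySem.List.pyGetD G (k : Int) 0 ≠ v) ↔ G[k]? ≠ some v := by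
    by_cases hk : k < G.length
    · have h1 : ¬ ((G.length : Int) ≤ (k : Int)) := by exact_mod_cast Nat.not_le.mpr hk
      have h2 : PySem.List.pyGetD G (k : Int) 0 = G[k] := by
        rw [PySem.List.pyGetD_natCast]; exact List.getD_eq_getElem _ _ hk
      have h3 : G[k]? = some G[k] := List.getElem?_eq_getElem hk
      rw [h2, h3]
      simp [h1]
    · have h1 : ((G.length : Int) ≤ (k : Int)) := by exact_mod_cast Nat.not_lt.mp hk
      have h3 : G[k]? = none := List.getElem?_eq_none (Nat.not_lt.mp hk)
      rw [h3]
      simp [h1]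
  rw [exists_other_index_iff G v k, ← hstep, ← List.count_pos_iff]
  constructor
  · rintro ⟨hc, h1 | hp⟩
    · exact Or.inl h1
    · rcases Nat.lt_or_ge 1 (G.count v) with h | h
      · exact Or.inl h
      · exact Or.inr ⟨by omega, hp⟩
  · rintro (h1 | ⟨hc, hp⟩)
    · constructor
      · omega
      · exact Or.inl h1
    · exact ⟨by omega, Or.inr hp⟩

-- ===== VERDICT (by name: the statement is the Claim_ definition above) =====
theorem ContarPicas_spec : Claim_equal_ContarPicas := by
  intro N G _
  unfold Spec_ContarPicas ContarPicas ContarPicas_alt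
  dsimp only
  rw [PySem.List.enumerate_eq_map_pyRange (d := 0), List.foldl_map, PySem.List.len_eq,
    PySem.List.pyRange_zero_natCast, List.foldl_map, List.foldl_map]
  apply PySem.List.foldl_congr_mem
  intro p k _
  dsimp only
  rw [PySem.Dict.foldl_insert_getD_add_one_eq_counter, PySem.Dict.getD_counter]
  have hloop := pvLoopA_spec (PySem.List.pyGetD N (k : Int) 0) G (k : Int) (G.length + 1) 0 (by omega)
  simp only [Nat.cast_zero] at hloop
  rw [hloop]
  have hiff : (∃ m, ∃ _ : m < G.length, 0 ≤ m ∧ G[m] = PySem.List.pyGetD N (k : Int) 0 ∧ (k : Int) ≠ (m : Int))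
      ↔ (1 < G.count (PySem.List.pyGetD N (k : Int) 0) ∨
         (G.count (PySem.List.pyGetD N (k : Int) 0) = 1 ∧
          ((G.length : Int) ≤ (k : Int) ∨ PySem.List.pyGetD G (k : Int) 0 ≠ PySem.List.pyGetD N (k : Int) 0))) := by
    rw [← cond_equiv]
    constructor
    · rintro ⟨m, hm, -, h⟩; exact ⟨m, hm, h⟩
    · rintro ⟨m, hm, h⟩; exact ⟨m, hm, Nat.zero_le m, h⟩
  simp only [hiff, decide_eq_true_eq, Nat.one_lt_cast, Nat.cast_eq_one]
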